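-- pv_equiv track=rewrite | github.com/damiskov/02443-stochastic-simulation | project 1/task12.py | get_sojourns
-- ===== SOURCE A (Python) =====
-- def get_sojourns(Y):
--
--     S = {i: 0 for i in range(5)}
--
--     for state in range(5):
--         for row in Y:
--
--             state_freq = row.count(state)
--             if state_freq > 0:
--                 time_in_state = (state_freq-1)*48
--                 S[state] += time_in_state
--     return S
-- ===== SOURCE B (Python) =====
-- def get_sojourns(Y):
--     # (c-1)*48 summed per row == 48 for every occurrence after the first:
--     # one pass per row with a 'seen' set, no counting at all.
--     S = {i: 0 for i in range(5)}
--     for row in Y: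
--         seen = set()
--         for x in row:
--             if x in seen:
--                 if 0 <= x < 5:
--                     S[x] += 48
--             else:
--                 seen.add(x)
--     return S
-- ===== Notes on version B (the rewrite author's own statement) =====
-- stated objective: alternative
-- what changed: A sums (count-1)*48 via five per-state scans of each row; B never counts: it walks each row once with a 'seen' set and adds 48 directly for every repeat occurrence of a state in 0..4, since (c-1)*48 is exactly 48 per occurrence after the first.
import Mathlib
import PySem

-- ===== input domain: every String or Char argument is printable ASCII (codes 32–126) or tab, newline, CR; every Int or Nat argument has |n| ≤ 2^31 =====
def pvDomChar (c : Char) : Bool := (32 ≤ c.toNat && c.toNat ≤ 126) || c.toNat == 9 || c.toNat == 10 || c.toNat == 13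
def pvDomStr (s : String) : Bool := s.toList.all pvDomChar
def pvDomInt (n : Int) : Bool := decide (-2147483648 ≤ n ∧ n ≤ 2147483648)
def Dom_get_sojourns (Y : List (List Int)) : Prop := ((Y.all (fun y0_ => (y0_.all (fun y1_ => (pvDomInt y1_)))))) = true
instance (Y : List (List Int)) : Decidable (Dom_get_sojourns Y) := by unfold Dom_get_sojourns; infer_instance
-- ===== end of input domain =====

-- B replaces A's five per-state scans with one pass per row using a 'seen' set: each repeat occurrence of a state in 0..4 adds 48 directly (no counting); alternative algorithm, same result.


-- ===== PORT A =====
-- S = {i: 0 for i in range(5)}; for state in range(5): for row in Y: c = row.count(state); if c > 0: S[state] += (c-1)*48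
def get_sojourns (Y : List (List Int)) : List (Int × Int) :=
  let S0 : PySem.Dict Int Int :=
    (PySem.List.pyRange 0 5 1).foldl (fun d i => d.insert i 0) PySem.Dict.empty
  let S :=
    (PySem.List.pyRange 0 5 1).foldl (fun S state =>
      Y.foldl (fun S row =>
        let c : Int := (row.count state : Int)
        if 0 < c then S.insert state (S.getD state 0 + (c - 1) * 48) else S) S) S0
  S.items

-- ===== PORT B =====
-- one pass per row with a 'seen' set; every occurrence of x after its first in the row adds 48 (when 0 <= x < 5)
def get_sojourns_alt (Y : List (List Int)) : List (Int × Int) :=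
  let S0 : PySem.Dict Int Int :=
    (PySem.List.pyRange 0 5 1).foldl (fun d i => d.insert i 0) PySem.Dict.empty
  let S :=
    Y.foldl (fun S row =>
      (row.foldl (fun (st : PySem.Set Int × PySem.Dict Int Int) x =>
        if PySem.Set.contains st.1 x then
          if 0 ≤ x ∧ x < 5 then (st.1, st.2.insert x (st.2.getD x 0 + 48)) else st
        else (PySem.Set.add st.1 x, st.2)) (PySem.Set.empty, S)).2) S0
  S.items

-- ===== PRECONDITION & SPEC =====
def Spec_get_sojourns (Y : List (List Int)) (out : List (Int × Int)) : Prop := out = get_sojourns_alt Y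
instance (Y : List (List Int)) (out : List (Int × Int)) : Decidable (Spec_get_sojourns Y out) := by unfold Spec_get_sojourns; infer_instance

-- ===== CLAIM (what is proved, stated in full; the proofs are below) =====
def Claim_equal_get_sojourns : Prop := ∀ (Y : List (List Int)), Dom_get_sojourns Y → Spec_get_sojourns Y (get_sojourns Y)

-- ===== LEMMAS AND PROOFS =====

-- per-row, per-state contribution and its total over all rows
def pvContrib (row : List Int) (s : Int) : Int :=
  if 0 < row.count s then ((row.count s : Int) - 1) * 48 else 0

def pvTot (Y : List (List Int)) (s : Int) : Int := (Y.map (fun r => pvContrib r s)).sum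

-- A's inner pass over Y for a fixed state: lookup level
theorem pvPassA_getD (state k : Int) (Y : List (List Int)) :
    ∀ d : PySem.Dict Int Int,
      (Y.foldl (fun S row =>
          let c : Int := (row.count state : Int)
          if 0 < c then S.insert state (S.getD state 0 + (c - 1) * 48) else S) d).getD k 0
      = d.getD k 0 + (if k = state then pvTot Y state else 0) := by
  induction Y with
  | nil => intro d; simp [pvTot]
  | cons r Y ih =>
    intro d
    simp only [List.foldl_cons, ih]
    have hT : pvTot (r :: Y) state = pvContrib r state + pvTot Y state := by
      simp [pvTot]
    rw [hT]
    by_cases hc : (0:Int) < (r.count state : Int)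
    · have hcn : 0 < r.count state := by exact_mod_cast hc
      simp only [hc, if_pos, PySem.Dict.getD_insert, pvContrib, hcn]
      by_cases hk : k = state
      · subst hk; simp; ring
      · simp [hk]
    · have hcn : ¬ 0 < r.count state := by exact_mod_cast hc
      simp only [hc, if_neg, not_false_iff, pvContrib, hcn]
      by_cases hk : k = state
      · subst hk; simp
      · simp [hk]

-- A's inner pass keeps the key list unchanged when the state is already a key
theorem pvPassA_keys (state : Int) (Y : List (List Int)) :
    ∀ d : PySem.Dict Int Int, state ∈ d.keys →
      (Y.foldl (fun S row =>
          let c : Int := (row.count state : Int)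
          if 0 < c then S.insert state (S.getD state 0 + (c - 1) * 48) else S) d).keys
      = d.keys := by
  induction Y with
  | nil => intro d _; rfl
  | cons r Y ih =>
    intro d hd
    simp only [List.foldl_cons]
    by_cases hc : (0:Int) < (r.count state : Int)
    · simp only [hc, if_pos]
      have hk : (d.insert state (d.getD state 0 + ((r.count state : Int) - 1) * 48)).keys = d.keys :=
        PySem.Dict.keys_insert_of_contains d _ ((PySem.Dict.contains_iff_mem_keys d state).mpr hd)
      rw [ih _ (by rw [hk]; exact hd), hk]
    · simp only [hc, if_neg, not_false_iff]
      exact ih d hd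

-- B's inner pass over a row: lookup level (the 'seen' set determines whether the first
-- occurrence of k still gets skipped)
theorem pvInnerB_getD (l : List Int) (k : Int) :
    ∀ (seen : PySem.Set Int) (S : PySem.Dict Int Int),
      ((l.foldl (fun (st : PySem.Set Int × PySem.Dict Int Int) x =>
          if PySem.Set.contains st.1 x then
            if 0 ≤ x ∧ x < 5 then (st.1, st.2.insert x (st.2.getD x 0 + 48)) else st
          else (PySem.Set.add st.1 x, st.2)) (seen, S)).2).getD k 0
        = S.getD k 0 +
          (if 0 ≤ k ∧ k < 5 then
            48 * (((if k ∈ seen then l.count k else l.count k - 1 : Nat)) : Int)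
          else 0) := by
  induction l with
  | nil => intro seen S; simp
  | cons x t ih =>
    intro seen S
    simp only [List.foldl_cons]
    by_cases hx : x ∈ seen
    · rw [if_pos ((PySem.Set.contains_iff seen x).mpr hx)]
      by_cases hr : 0 ≤ x ∧ x < 5
      · rw [if_pos hr, ih]
        by_cases hk : k = x
        · subst hk
          have hgd : (S.insert k (S.getD k 0 + 48)).getD k 0 = S.getD k 0 + 48 := by
            simp
          rw [hgd]
          simp only [if_pos hr, if_pos hx, List.count_cons_self]
          push_cast
          ring
        · have hgd : (S.insert x (S.getD x 0 + 48)).getD k 0 = S.getD k 0 := by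
            simp [PySem.Dict.getD_insert, hk]
          rw [hgd, List.count_cons_of_ne (fun h => hk h.symm)]
      · rw [if_neg hr, ih]
        by_cases hk : k = x
        · subst hk
          simp only [if_neg hr]
        · rw [List.count_cons_of_ne (fun h => hk h.symm)]
    · rw [if_neg (fun h => hx ((PySem.Set.contains_iff seen x).mp h)), ih]
      by_cases hk : k = x
      · subst hk
        have hmem : k ∈ PySem.Set.add seen k := (PySem.Set.mem_add seen k k).mpr (Or.inr rfl)
        simp only [if_pos hmem, if_neg hx, List.count_cons_self, Nat.add_sub_cancel]
      · have hmem : (k ∈ PySem.Set.add seen x) ↔ k ∈ seen := by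
          rw [PySem.Set.mem_add]
          exact ⟨fun h => h.resolve_right hk, Or.inl⟩
        rw [List.count_cons_of_ne (fun h => hk h.symm)]
        by_cases hks : k ∈ seen
        · simp only [if_pos (hmem.mpr hks), if_pos hks]
        · simp only [if_neg (fun h => hks (hmem.mp h)), if_neg hks]

-- B's inner pass keeps the key list [0..4] unchanged
theorem pvInnerB_keys (l : List Int) :
    ∀ (seen : PySem.Set Int) (S : PySem.Dict Int Int), S.keys = [0, 1, 2, 3, 4] →
      ((l.foldl (fun (st : PySem.Set Int × PySem.Dict Int Int) x =>
          if PySem.Set.contains st.1 x then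
            if 0 ≤ x ∧ x < 5 then (st.1, st.2.insert x (st.2.getD x 0 + 48)) else st
          else (PySem.Set.add st.1 x, st.2)) (seen, S)).2).keys
        = [0, 1, 2, 3, 4] := by
  induction l with
  | nil => intro seen S h; exact h
  | cons x t ih =>
    intro seen S h
    simp only [List.foldl_cons]
    by_cases hx : PySem.Set.contains seen x = true
    · by_cases hr : 0 ≤ x ∧ x < 5
      · simp only [hx, if_pos, hr]
        have hmem : x ∈ S.keys := by
          rw [h]; simp only [List.mem_cons, List.not_mem_nil, or_false]; omega
        have hk := PySem.Dict.keys_insert_of_contains S (S.getD x 0 + 48)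
          ((PySem.Dict.contains_iff_mem_keys S x).mpr hmem)
        exact ih _ _ (by rw [hk, h])
      · simp only [hx, if_pos, hr, if_false]
        exact ih _ _ h
    · simp only [hx]
      exact ih _ _ h

-- one row of B contributes exactly pvContrib at every state 0..4
theorem pvRowB_getD (row : List Int) (k : Int) (hk : 0 ≤ k ∧ k < 5) (S : PySem.Dict Int Int) :
    ((row.foldl (fun (st : PySem.Set Int × PySem.Dict Int Int) x =>
        if PySem.Set.contains st.1 x then
          if 0 ≤ x ∧ x < 5 then (st.1, st.2.insert x (st.2.getD x 0 + 48)) else st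
        else (PySem.Set.add st.1 x, st.2)) (PySem.Set.empty, S)).2).getD k 0
      = S.getD k 0 + pvContrib row k := by
  rw [pvInnerB_getD, if_pos hk]
  have hne : k ∉ (PySem.Set.empty : PySem.Set Int) := by simp [PySem.Set.empty]
  rw [if_neg hne]
  congr 1
  unfold pvContrib
  by_cases hc : 0 < row.count k
  · rw [if_pos (by exact_mod_cast hc)]
    push_cast [Nat.cast_sub (by omega : 1 ≤ row.count k)]
    ring
  · have h0 : row.count k = 0 := by omega
    simp [h0]

-- B's outer loop over all rows
theorem pvOuterB (Y : List (List Int)) :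
    ∀ S : PySem.Dict Int Int, S.keys = [0, 1, 2, 3, 4] →
      (Y.foldl (fun S row =>
          (row.foldl (fun (st : PySem.Set Int × PySem.Dict Int Int) x =>
            if PySem.Set.contains st.1 x then
              if 0 ≤ x ∧ x < 5 then (st.1, st.2.insert x (st.2.getD x 0 + 48)) else st
            else (PySem.Set.add st.1 x, st.2)) (PySem.Set.empty, S)).2) S).keys
        = [0, 1, 2, 3, 4] ∧
      ∀ k : Int, 0 ≤ k ∧ k < 5 →
        (Y.foldl (fun S row =>
            (row.foldl (fun (st : PySem.Set Int × PySem.Dict Int Int) x =>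
              if PySem.Set.contains st.1 x then
                if 0 ≤ x ∧ x < 5 then (st.1, st.2.insert x (st.2.getD x 0 + 48)) else st
              else (PySem.Set.add st.1 x, st.2)) (PySem.Set.empty, S)).2) S).getD k 0
          = S.getD k 0 + pvTot Y k := by
  induction Y with
  | nil => intro S h; exact ⟨h, by intro k _; simp [pvTot]⟩
  | cons r Y ih =>
    intro S h
    simp only [List.foldl_cons]
    have hkeys := pvInnerB_keys r PySem.Set.empty S h
    refine ⟨(ih _ hkeys).1, ?_⟩
    intro k hk
    rw [(ih _ hkeys).2 k hk, pvRowB_getD r k hk S]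
    have : pvTot (r :: Y) k = pvContrib r k + pvTot Y k := by simp [pvTot]
    rw [this]
    ring

-- sum of a point indicator over states (used in A's final evaluation)
theorem pvOuterA (states : List Int) (Y : List (List Int)) :
    ∀ d : PySem.Dict Int Int, d.keys = [0, 1, 2, 3, 4] →
      (∀ s ∈ states, s ∈ ([0, 1, 2, 3, 4] : List Int)) →
      (states.foldl (fun S state =>
          Y.foldl (fun S row =>
            let c : Int := (row.count state : Int)
            if 0 < c then S.insert state (S.getD state 0 + (c - 1) * 48) else S) S) d).keys
        = [0, 1, 2, 3, 4] ∧
      ∀ k : Int,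
        (states.foldl (fun S state =>
            Y.foldl (fun S row =>
              let c : Int := (row.count state : Int)
              if 0 < c then S.insert state (S.getD state 0 + (c - 1) * 48) else S) S) d).getD k 0
          = d.getD k 0 + (states.map (fun s => if k = s then pvTot Y s else 0)).sum := by
  induction states with
  | nil => intro d h _; exact ⟨h, by intro k; simp⟩
  | cons s states ih =>
    intro d h hsub
    simp only [List.foldl_cons]
    have hs : s ∈ d.keys := by rw [h]; exact hsub s (List.mem_cons_self ..)
    have hkeys := pvPassA_keys s Y d hs
    obtain ⟨ihk, ihg⟩ := ih _ (by rw [hkeys, h]) (fun t ht => hsub t (List.mem_cons_of_mem _ ht))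
    refine ⟨ihk, ?_⟩
    intro k
    rw [ihg k, pvPassA_getD s k Y d]
    simp only [List.map_cons, List.sum_cons]
    ring

theorem get_sojourns_spec : Claim_equal_get_sojourns := by
  intro Y _
  unfold Spec_get_sojourns get_sojourns get_sojourns_alt
  have hrange : PySem.List.pyRange 0 5 1 = [0, 1, 2, 3, 4] := by decide
  simp only [hrange]
  have hS0 : (([0, 1, 2, 3, 4] : List Int).foldl (fun d i => d.insert i 0)
      (PySem.Dict.empty : PySem.Dict Int Int)).keys = [0, 1, 2, 3, 4] := by decide
  obtain ⟨hAk, hAg⟩ := pvOuterA [0, 1, 2, 3, 4] Y _ hS0 (fun s hs => hs)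
  obtain ⟨hBk, hBg⟩ := pvOuterB Y _ hS0
  rw [PySem.Dict.items_eq_map_keys _ (by rw [hAk]; decide) 0,
      PySem.Dict.items_eq_map_keys _ (by rw [hBk]; decide) 0, hAk, hBk]
  apply List.map_congr_left
  intro a ha
  have hb : 0 ≤ a ∧ a < 5 := by
    simp only [List.mem_cons, List.not_mem_nil, or_false] at ha
    omega
  rw [hAg a, hBg a hb]
  fin_cases ha <;> norm_num [pvTot]
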